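-- pv_equiv track=rewrite | github.com/elixirrjob1/cursorskills | .cursor/skills/stm-from-data-model/scripts/generate_stm_from_model.py | _deduplicate_tags
-- ===== SOURCE A (Python) =====
-- _TAG_TIER: dict[str, int] = {
--     "Architecture.Enriched": 3, "Architecture.Curated": 2, "Architecture.Raw": 1,
--     "Certification.Gold": 3, "Certification.Silver": 2, "Certification.Bronze": 1,
--     "PII.Sensitive": 3, "PII.NonSensitive": 2, "PII.None": 1,
--     "Tier.Tier1": 3, "Tier.Tier2": 2, "Tier.Tier3": 1,
-- }
--
-- def _deduplicate_tags(
--     rows: list[tuple[str, str, str, str]],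
-- ) -> list[tuple[str, str, str, str]]:
--     """Deduplicate (scope, column, tag_fqn, classification) rows.
--
--     For table-level: one tag per classification, highest tier wins.
--     For column-level: one tag per (column, classification), highest tier wins.
--     """
--     table_best: dict[str, tuple[str, str, str, str]] = {}
--     col_best: dict[tuple[str, str], tuple[str, str, str, str]] = {}
--     table_order: list[str] = []
--     col_order: list[tuple[str, str]] = []
--
--     for row in rows:
--         scope, column, tag_fqn, classification = row
--         tier = _TAG_TIER.get(tag_fqn, 0)
--
--         if scope == "Table":
--             existing = table_best.get(classification)
--             if existing is None:
--                 table_best[classification] = row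
--                 table_order.append(classification)
--             else:
--                 existing_tier = _TAG_TIER.get(existing[2], 0)
--                 if tier > existing_tier:
--                     table_best[classification] = row
--         else:
--             key = (column, classification)
--             existing = col_best.get(key)
--             if existing is None:
--                 col_best[key] = row
--                 col_order.append(key)
--             else:
--                 existing_tier = _TAG_TIER.get(existing[2], 0)
--                 if tier > existing_tier:
--                     col_best[key] = row
--
--     result: list[tuple[str, str, str, str]] = []
--     seen_t: set[str] = set()
--     for cls in table_order:
--         if cls not in seen_t:
--             result.append(table_best[cls])
--             seen_t.add(cls)
--     seen_c: set[tuple[str, str]] = set()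
--     for key in col_order:
--         if key not in seen_c:
--             result.append(col_best[key])
--             seen_c.add(key)
--     return result
-- ===== SOURCE B (Python) =====
-- _TAG_TIER: dict[str, int] = {
--     "Architecture.Enriched": 3, "Architecture.Curated": 2, "Architecture.Raw": 1,
--     "Certification.Gold": 3, "Certification.Silver": 2, "Certification.Bronze": 1,
--     "PII.Sensitive": 3, "PII.NonSensitive": 2, "PII.None": 1,
--     "Tier.Tier1": 3, "Tier.Tier2": 2, "Tier.Tier3": 1,
-- }
--
--
-- def _deduplicate_tags(
--     rows: list[tuple[str, str, str, str]],
-- ) -> list[tuple[str, str, str, str]]: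
--     """Group rows first, then pick each group's winner with max().
--
--     Table-scope rows are grouped by classification, all other rows by
--     (column, classification); dict insertion order preserves first
--     appearance, and max() returns the first row of highest tier.
--     """
--     table_groups: dict[str, list[tuple[str, str, str, str]]] = {}
--     col_groups: dict[tuple[str, str], list[tuple[str, str, str, str]]] = {}
--
--     for row in rows:
--         scope, column, _tag_fqn, classification = row
--         if scope == "Table":
--             table_groups.setdefault(classification, []).append(row)
--         else:
--             col_groups.setdefault((column, classification), []).append(row)
--
--     result = []
--     for group in table_groups.values():
--         result.append(max(group, key=lambda r: _TAG_TIER.get(r[2], 0)))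
--     for group in col_groups.values():
--         result.append(max(group, key=lambda r: _TAG_TIER.get(r[2], 0)))
--     return result
-- ===== Notes on version B (the rewrite author's own statement) =====
-- stated objective: alternative
-- what changed: Instead of tracking a running best row per key in two best-dicts plus separate order lists and seen sets, B buckets rows into two insertion-ordered group dicts in one pass and then selects each group's winner with max(group, key=tier), whose first-max tie-break matches A's strict-> update rule.
import Mathlib
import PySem

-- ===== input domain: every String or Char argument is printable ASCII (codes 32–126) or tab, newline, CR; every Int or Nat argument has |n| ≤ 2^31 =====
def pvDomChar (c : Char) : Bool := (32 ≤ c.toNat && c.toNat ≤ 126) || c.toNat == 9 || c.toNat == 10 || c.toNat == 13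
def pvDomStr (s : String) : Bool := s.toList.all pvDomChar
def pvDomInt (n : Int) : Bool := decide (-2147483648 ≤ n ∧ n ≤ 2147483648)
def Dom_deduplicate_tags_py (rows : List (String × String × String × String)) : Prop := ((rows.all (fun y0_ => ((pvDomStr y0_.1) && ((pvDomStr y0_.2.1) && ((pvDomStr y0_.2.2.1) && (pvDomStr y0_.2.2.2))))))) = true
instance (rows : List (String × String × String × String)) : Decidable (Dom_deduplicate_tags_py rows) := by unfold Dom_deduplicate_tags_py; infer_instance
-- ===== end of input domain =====

-- B replaces A's running-best dicts + order lists + seen sets by one bucketing pass into two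
-- insertion-ordered group dicts followed by a max(key=tier) reduction per group (objective: alternative).

-- shared module constant _TAG_TIER and the lookup _TAG_TIER.get(fqn, 0)
def tagTier : PySem.Dict String Int := PySem.Dict.ofList [
  ("Architecture.Enriched", 3), ("Architecture.Curated", 2), ("Architecture.Raw", 1),
  ("Certification.Gold", 3), ("Certification.Silver", 2), ("Certification.Bronze", 1),
  ("PII.Sensitive", 3), ("PII.NonSensitive", 2), ("PII.None", 1),
  ("Tier.Tier1", 3), ("Tier.Tier2", 2), ("Tier.Tier3", 1)]

def tierOf (fqn : String) : Int := tagTier.getD fqn 0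

-- ===== PORT A =====
-- one iteration of A's main loop; row = (scope, column, tag_fqn, classification)
def dedupStepA
    (st : PySem.Dict String (String × String × String × String) ×
          PySem.Dict (String × String) (String × String × String × String) ×
          List String × List (String × String))
    (row : String × String × String × String) :
    PySem.Dict String (String × String × String × String) ×
    PySem.Dict (String × String) (String × String × String × String) ×
    List String × List (String × String) :=
  let tier := tierOf row.2.2.1
  if row.1 == "Table" then
    match st.1.get? row.2.2.2 with
    | none => (st.1.insert row.2.2.2 row, st.2.1, st.2.2.1 ++ [row.2.2.2], st.2.2.2)
    | some existing =>
        if tier > tierOf existing.2.2.1 then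
          (st.1.insert row.2.2.2 row, st.2.1, st.2.2.1, st.2.2.2)
        else st
  else
    match st.2.1.get? (row.2.1, row.2.2.2) with
    | none => (st.1, st.2.1.insert (row.2.1, row.2.2.2) row, st.2.2.1, st.2.2.2 ++ [(row.2.1, row.2.2.2)])
    | some existing =>
        if tier > tierOf existing.2.2.1 then
          (st.1, st.2.1.insert (row.2.1, row.2.2.2) row, st.2.2.1, st.2.2.2)
        else st

-- A's output loop 'for k in order: if k not in seen: result.append(best[k]); seen.add(k)'.
-- Python's best[k] cannot raise here (every key in order was inserted into best);
-- it is ported as getD with an unreachable default row.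
def emitLoopA {κ : Type} [BEq κ]
    (best : PySem.Dict κ (String × String × String × String)) (order : List κ)
    (acc : List (String × String × String × String)) : List (String × String × String × String) :=
  (order.foldl
    (fun (p : List (String × String × String × String) × PySem.Set κ) k =>
      if PySem.Set.contains p.2 k then p
      else (p.1 ++ [best.getD k ("", "", "", "")], PySem.Set.add p.2 k))
    (acc, PySem.Set.empty)).1

def deduplicate_tags_py (rows : List (String × String × String × String)) :
    List (String × String × String × String) :=
  let st := rows.foldl dedupStepA (PySem.Dict.empty, PySem.Dict.empty, [], [])
  emitLoopA st.2.1 st.2.2.2 (emitLoopA st.1 st.2.2.1 [])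

-- ===== PORT B =====
-- one iteration of B's bucketing loop: groups.setdefault(key, []).append(row)
def dedupStepB
    (st : PySem.Dict String (List (String × String × String × String)) ×
          PySem.Dict (String × String) (List (String × String × String × String)))
    (row : String × String × String × String) :
    PySem.Dict String (List (String × String × String × String)) ×
    PySem.Dict (String × String) (List (String × String × String × String)) :=
  if row.1 == "Table" then
    (st.1.modify row.2.2.2 [] (fun g => g ++ [row]), st.2)
  else
    (st.1, st.2.modify (row.2.1, row.2.2.2) [] (fun g => g ++ [row]))

-- Python's max(group, key=lambda r: _TAG_TIER.get(r[2], 0)); groups are never empty,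
-- so the default row of maxD is unreachable.
def bestOf (g : List (String × String × String × String)) : String × String × String × String :=
  PySem.List.maxD g (fun r => tierOf r.2.2.1) ("", "", "", "")

def deduplicate_tags_py_alt (rows : List (String × String × String × String)) :
    List (String × String × String × String) :=
  let st := rows.foldl dedupStepB (PySem.Dict.empty, PySem.Dict.empty)
  let res := st.1.values.foldl (fun acc g => acc ++ [bestOf g]) []
  st.2.values.foldl (fun acc g => acc ++ [bestOf g]) res

-- ===== PRECONDITION & SPEC =====
def Spec_deduplicate_tags_py (rows : List (String × String × String × String)) (out : List (String × String × String × String)) : Prop := out = deduplicate_tags_py_alt rows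
instance (rows : List (String × String × String × String)) (out : List (String × String × String × String)) : Decidable (Spec_deduplicate_tags_py rows out) := by unfold Spec_deduplicate_tags_py; infer_instance

-- ===== CLAIM (what is proved, stated in full; the proofs are below) =====
def Claim_equal_deduplicate_tags_py : Prop := ∀ (rows : List (String × String × String × String)), Dom_deduplicate_tags_py rows → Spec_deduplicate_tags_py rows (deduplicate_tags_py rows)

-- ===== LEMMAS AND PROOFS =====

-- the loop invariant linking A's (best, order) state to B's group dicts
def DedupInv
    (tb : PySem.Dict String (String × String × String × String))
    (cb : PySem.Dict (String × String) (String × String × String × String))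
    (to_ : List String) (co : List (String × String))
    (tg : PySem.Dict String (List (String × String × String × String)))
    (cg : PySem.Dict (String × String) (List (String × String × String × String))) : Prop :=
  to_ = tg.keys ∧ co = cg.keys ∧ tg.keys.Nodup ∧ cg.keys.Nodup ∧
  (∀ c g, tg.get? c = some g → g ≠ []) ∧
  (∀ k g, cg.get? k = some g → g ≠ []) ∧
  (∀ c, tb.get? c = (tg.get? c).map bestOf) ∧
  (∀ k, cb.get? k = (cg.get? k).map bestOf)

lemma bestOf_singleton (r : String × String × String × String) : bestOf [r] = r := by
  simp [bestOf, PySem.List.maxD, PySem.List.max?]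

lemma bestOf_append (g : List (String × String × String × String))
    (r : String × String × String × String) (h : g ≠ []) :
    bestOf (g ++ [r]) =
      if tierOf r.2.2.1 > tierOf (bestOf g).2.2.1 then r else bestOf g := by
  obtain ⟨m, hm⟩ : ∃ m, PySem.List.max? g (fun r => tierOf r.2.2.1) = some m := by
    cases hmx : PySem.List.max? g (fun r => tierOf r.2.2.1) with
    | none => exact absurd ((PySem.List.max?_eq_none_iff _ _).mp hmx) h
    | some m => exact ⟨m, rfl⟩
  simp only [bestOf, PySem.List.maxD, PySem.List.max?, List.foldl_append] at *
  rw [hm]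
  simp only [List.foldl, gt_iff_lt, Option.getD_some]
  split_ifs <;> simp

-- first row for a key: both sides create the entry
lemma upd_fresh {κ : Type} [BEq κ] [LawfulBEq κ] [DecidableEq κ]
    (best : PySem.Dict κ (String × String × String × String)) (ord : List κ)
    (grp : PySem.Dict κ (List (String × String × String × String)))
    (key : κ) (row : String × String × String × String)
    (hget : best.get? key = none)
    (h1 : ord = grp.keys) (h3 : grp.keys.Nodup)
    (h5 : ∀ c g, grp.get? c = some g → g ≠ [])
    (h7 : ∀ c, best.get? c = (grp.get? c).map bestOf) :
    ord ++ [key] = (grp.modify key [] (fun g => g ++ [row])).keys ∧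
    (grp.modify key [] (fun g => g ++ [row])).keys.Nodup ∧
    (∀ c g, (grp.modify key [] (fun g => g ++ [row])).get? c = some g → g ≠ []) ∧
    (∀ c, (best.insert key row).get? c =
      ((grp.modify key [] (fun g => g ++ [row])).get? c).map bestOf) := by
  have hg : grp.get? key = none := by
    have := h7 key
    rw [hget] at this
    cases hgk : grp.get? key with
    | none => rfl
    | some g => rw [hgk] at this; simp at this
  have hcont : grp.contains key = false := by
    rw [PySem.Dict.contains_eq_isSome_get?, hg]; rfl
  have hmod : grp.modify key [] (fun g => g ++ [row]) = grp.insert key [row] := by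
    simp [PySem.Dict.modify, PySem.Dict.getD, hg]
  rw [hmod]
  refine ⟨?_, PySem.Dict.nodup_keys_insert _ _ _ h3, ?_, ?_⟩
  · rw [PySem.Dict.keys_insert_of_not_contains _ _ hcont, h1]
  · intro c g hc
    rw [PySem.Dict.get?_insert] at hc
    by_cases hck : c = key
    · simp [hck] at hc; simp [← hc]
    · rw [if_neg hck] at hc; exact h5 c g hc
  · intro c
    rw [PySem.Dict.get?_insert, PySem.Dict.get?_insert]
    by_cases hck : c = key
    · simp [hck, bestOf_singleton]
    · simp only [if_neg hck]; exact h7 c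

-- later row for a key: A keeps the running best under strict >, B appends to the group
lemma upd_seen {κ : Type} [BEq κ] [LawfulBEq κ] [DecidableEq κ]
    (best : PySem.Dict κ (String × String × String × String)) (ord : List κ)
    (grp : PySem.Dict κ (List (String × String × String × String)))
    (key : κ) (row existing : String × String × String × String)
    (hget : best.get? key = some existing)
    (h1 : ord = grp.keys) (h3 : grp.keys.Nodup)
    (h5 : ∀ c g, grp.get? c = some g → g ≠ [])
    (h7 : ∀ c, best.get? c = (grp.get? c).map bestOf) :
    ord = (grp.modify key [] (fun g => g ++ [row])).keys ∧
    (grp.modify key [] (fun g => g ++ [row])).keys.Nodup ∧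
    (∀ c g, (grp.modify key [] (fun g => g ++ [row])).get? c = some g → g ≠ []) ∧
    (∀ c, (if tierOf row.2.2.1 > tierOf existing.2.2.1 then best.insert key row else best).get? c =
      ((grp.modify key [] (fun g => g ++ [row])).get? c).map bestOf) := by
  obtain ⟨g0, hg0, hbg0⟩ : ∃ g0, grp.get? key = some g0 ∧ bestOf g0 = existing := by
    have := h7 key
    rw [hget] at this
    cases hgk : grp.get? key with
    | none => rw [hgk] at this; simp at this
    | some g => rw [hgk] at this; simp at this; exact ⟨g, rfl, this.symm⟩
  have hne : g0 ≠ [] := h5 key g0 hg0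
  have hcont : grp.contains key = true := by
    rw [PySem.Dict.contains_eq_isSome_get?, hg0]; rfl
  have hmod : grp.modify key [] (fun g => g ++ [row]) = grp.insert key (g0 ++ [row]) := by
    simp [PySem.Dict.modify, PySem.Dict.getD, hg0]
  rw [hmod]
  have hkeys : (grp.insert key (g0 ++ [row])).keys = grp.keys :=
    PySem.Dict.keys_insert_of_contains _ _ hcont
  refine ⟨by rw [hkeys, h1], by rw [hkeys]; exact h3, ?_, ?_⟩
  · intro c g hc
    rw [PySem.Dict.get?_insert] at hc
    by_cases hck : c = key
    · simp [hck] at hc; simp [← hc]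
    · rw [if_neg hck] at hc; exact h5 c g hc
  · intro c
    rw [PySem.Dict.get?_insert]
    by_cases hck : c = key
    · subst hck
      rw [if_pos rfl, Option.map_some, bestOf_append g0 row hne, hbg0]
      split_ifs with hcmp
      · simp [PySem.Dict.get?_insert_self]
      · simp [hget]
    · rw [if_neg hck]
      split_ifs with hcmp
      · rw [PySem.Dict.get?_insert_of_ne _ _ hck]; exact h7 c
      · exact h7 c

lemma DedupInv_step (row : String × String × String × String)
    (tb : PySem.Dict String (String × String × String × String))
    (cb : PySem.Dict (String × String) (String × String × String × String))
    (to_ : List String) (co : List (String × String))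
    (tg : PySem.Dict String (List (String × String × String × String)))
    (cg : PySem.Dict (String × String) (List (String × String × String × String)))
    (hInv : DedupInv tb cb to_ co tg cg) :
    DedupInv (dedupStepA (tb, cb, to_, co) row).1 (dedupStepA (tb, cb, to_, co) row).2.1
        (dedupStepA (tb, cb, to_, co) row).2.2.1 (dedupStepA (tb, cb, to_, co) row).2.2.2
        (dedupStepB (tg, cg) row).1 (dedupStepB (tg, cg) row).2 := by
  obtain ⟨h1, h2, h3, h4, h5, h6, h7, h8⟩ := hInv
  unfold DedupInv
  by_cases hs : (row.1 == "Table") = true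
  · cases htb : tb.get? row.2.2.2 with
    | none =>
        have h := upd_fresh tb to_ tg row.2.2.2 row htb h1 h3 h5 h7
        simp only [dedupStepA, dedupStepB, hs, if_true, htb]
        exact ⟨h.1, h2, h.2.1, h4, h.2.2.1, h6, h.2.2.2, h8⟩
    | some ex =>
        have h := upd_seen tb to_ tg row.2.2.2 row ex htb h1 h3 h5 h7
        simp only [dedupStepA, dedupStepB, hs, if_true, htb]
        by_cases hcmp : tierOf row.2.2.1 > tierOf ex.2.2.1
        · simp only [if_pos hcmp] at h ⊢
          exact ⟨h.1, h2, h.2.1, h4, h.2.2.1, h6, h.2.2.2, h8⟩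
        · simp only [if_neg hcmp] at h ⊢
          exact ⟨h.1, h2, h.2.1, h4, h.2.2.1, h6, h.2.2.2, h8⟩
  · have hs' : (row.1 == "Table") = false := by
      revert hs; cases row.1 == "Table" <;> simp
    cases hcb : cb.get? (row.2.1, row.2.2.2) with
    | none =>
        have h := upd_fresh cb co cg (row.2.1, row.2.2.2) row hcb h2 h4 h6 h8
        simp only [dedupStepA, dedupStepB, hs', Bool.false_eq_true, if_false, hcb]
        exact ⟨h1, h.1, h3, h.2.1, h5, h.2.2.1, h7, h.2.2.2⟩
    | some ex =>
        have h := upd_seen cb co cg (row.2.1, row.2.2.2) row ex hcb h2 h4 h6 h8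
        simp only [dedupStepA, dedupStepB, hs', Bool.false_eq_true, if_false, hcb]
        by_cases hcmp : tierOf row.2.2.1 > tierOf ex.2.2.1
        · simp only [if_pos hcmp] at h ⊢
          exact ⟨h1, h.1, h3, h.2.1, h5, h.2.2.1, h7, h.2.2.2⟩
        · simp only [if_neg hcmp] at h ⊢
          exact ⟨h1, h.1, h3, h.2.1, h5, h.2.2.1, h7, h.2.2.2⟩

lemma DedupInv_loop (rows : List (String × String × String × String))
    (tb : PySem.Dict String (String × String × String × String))
    (cb : PySem.Dict (String × String) (String × String × String × String))
    (to_ : List String) (co : List (String × String))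
    (tg : PySem.Dict String (List (String × String × String × String)))
    (cg : PySem.Dict (String × String) (List (String × String × String × String)))
    (hInv : DedupInv tb cb to_ co tg cg) :
    DedupInv (rows.foldl dedupStepA (tb, cb, to_, co)).1
        (rows.foldl dedupStepA (tb, cb, to_, co)).2.1
        (rows.foldl dedupStepA (tb, cb, to_, co)).2.2.1
        (rows.foldl dedupStepA (tb, cb, to_, co)).2.2.2
        (rows.foldl dedupStepB (tg, cg)).1
        (rows.foldl dedupStepB (tg, cg)).2 := by
  induction rows generalizing tb cb to_ co tg cg with
  | nil => exact hInv
  | cons r rest ih =>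
      have h := DedupInv_step r tb cb to_ co tg cg hInv
      simpa using ih _ _ _ _ _ _ h

-- A's output loop over a Nodup order list whose keys are all unseen appends best[k] for each k
lemma emitLoopA_eq {κ : Type} [BEq κ] [LawfulBEq κ]
    (best : PySem.Dict κ (String × String × String × String))
    (order : List κ) (acc : List (String × String × String × String))
    (hnd : order.Nodup) :
    emitLoopA best order acc = acc ++ order.map (fun k => best.getD k ("", "", "", "")) := by
  have main : ∀ (l : List κ) (acc : List (String × String × String × String)) (s : PySem.Set κ),
      l.Nodup → (∀ k ∈ l, PySem.Set.contains s k = false) →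
      (l.foldl
        (fun (p : List (String × String × String × String) × PySem.Set κ) k =>
          if PySem.Set.contains p.2 k then p
          else (p.1 ++ [best.getD k ("", "", "", "")], PySem.Set.add p.2 k)) (acc, s)).1
        = acc ++ l.map (fun k => best.getD k ("", "", "", "")) := by
    intro l
    induction l with
    | nil => intro acc s _ _; simp
    | cons k rest ih =>
        intro acc s hnd hseen
        have hk : PySem.Set.contains s k = false := hseen k (by simp)
        simp only [List.foldl_cons, hk, Bool.false_eq_true, if_false]
        rw [ih _ _ (List.nodup_cons.mp hnd).2 ?_]
        · simp
        · intro k' hk'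
          have hne : k' ≠ k := by
            intro hEq; exact (List.nodup_cons.mp hnd).1 (hEq ▸ hk')
          have hk'0 : PySem.Set.contains s k' = false := hseen k' (by simp [hk'])
          have hks : k ∉ s := by simpa [PySem.Set.contains] using hk
          have hk's : k' ∉ s := by simpa [PySem.Set.contains] using hk'0
          simp [PySem.Set.add, PySem.Set.contains, hks, hk's, hne]
  have h0 : ∀ k ∈ order, PySem.Set.contains (PySem.Set.empty (α := κ)) k = false := by
    intro k _; rfl
  exact main order acc PySem.Set.empty hnd h0

-- ===== VERDICT (by name: the statement is the Claim_ definition above) =====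
theorem deduplicate_tags_py_spec : Claim_equal_deduplicate_tags_py := by
  intro rows _
  unfold Spec_deduplicate_tags_py deduplicate_tags_py deduplicate_tags_py_alt
  have h0 : DedupInv PySem.Dict.empty PySem.Dict.empty [] [] PySem.Dict.empty PySem.Dict.empty := by
    refine ⟨rfl, rfl, ?_, ?_, ?_, ?_, ?_, ?_⟩ <;>
      simp [PySem.Dict.get?, PySem.Dict.keys, PySem.Dict.empty]
  obtain ⟨h1, h2, h3, h4, h5, h6, h7, h8⟩ :=
    DedupInv_loop rows PySem.Dict.empty PySem.Dict.empty [] [] PySem.Dict.empty PySem.Dict.empty h0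
  rw [emitLoopA_eq _ _ _ (by rw [h2]; exact h4), emitLoopA_eq _ _ _ (by rw [h1]; exact h3)]
  rw [PySem.List.foldl_append_singleton_eq_map, PySem.List.foldl_append_singleton_eq_map]
  rw [PySem.Dict.values_eq_map_keys _ h3 [], PySem.Dict.values_eq_map_keys _ h4 []]
  rw [h1, h2]
  simp only [List.map_map, List.nil_append]
  congr 1
  · apply List.map_congr_left
    intro k hk
    obtain ⟨g, hg⟩ : ∃ g,
        (rows.foldl dedupStepB (PySem.Dict.empty, PySem.Dict.empty)).1.get? k = some g := by
      cases hq : (rows.foldl dedupStepB (PySem.Dict.empty, PySem.Dict.empty)).1.get? k with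
      | none => exact absurd hk ((PySem.Dict.get?_eq_none_iff_not_mem_keys _ _).mp hq)
      | some g => exact ⟨g, rfl⟩
    simp [PySem.Dict.getD, h7 k, hg]
  · apply List.map_congr_left
    intro k hk
    obtain ⟨g, hg⟩ : ∃ g,
        (rows.foldl dedupStepB (PySem.Dict.empty, PySem.Dict.empty)).2.get? k = some g := by
      cases hq : (rows.foldl dedupStepB (PySem.Dict.empty, PySem.Dict.empty)).2.get? k with
      | none => exact absurd hk ((PySem.Dict.get?_eq_none_iff_not_mem_keys _ _).mp hq)
      | some g => exact ⟨g, rfl⟩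
    simp [PySem.Dict.getD, h8 k, hg]
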